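-- pv_equiv track=rewrite | github.com/axpokl/LightOut | ManimGL/lights_out_gl_from_png_ - 副本 (32).py | make_ops_n2
-- ===== SOURCE A (Python) =====
-- def make_ops_n2(mat, n):
--     A=[row[:] for row in mat]
--     N=len(A)
--     fwd=[]
--     piv=[]
--     r=0
--     for c in range(N):
--         p=None
--         for i in range(r,N):
--             if A[i][c]&1:
--                 p=i
--                 break
--         if p is None:
--             continue
--         if p!=r:
--             A[p],A[r]=A[r],A[p]
--             fwd.append([1,p//n,p%n,r//n,r%n])
--         for i in range(r+1,N):
--             if A[i][c]&1:
--                 A[i]=[x^y for x,y in zip(A[i],A[r])]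
--                 fwd.append([0,r//n,r%n,i//n,i%n])
--         piv.append((r,c))
--         r+=1
--         if r==N: break
--     bwd=[]
--     for r,c in reversed(piv):
--         for i in range(r):
--             if A[i][c]&1:
--                 A[i]=[x^y for x,y in zip(A[i],A[r])]
--                 bwd.append([0,r//n,r%n,i//n,i%n])
--     return fwd,bwd
-- ===== SOURCE B (Python) =====
-- def make_ops_n2(mat, n):
--     # Different algorithm shape: rows are packed into integer bitmasks; the
--     # forward phase walks the *remaining block* of rows (a shrinking suffix
--     # list) instead of indexing a mutable N x N array, and the backward phase
--     # is transposed to be ROW-major: every row is reduced independently against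
--     # the already fully-reduced pivot rows, recording which pivots fired, and
--     # the op list is then emitted grouped per pivot in A's pivot-major order.
--     N = len(mat)
--     rows = []
--     for row in mat:
--         m = 0
--         for j, x in enumerate(row):
--             m |= (x & 1) << j
--         rows.append(m)
--
--     fwd = []
--     piv = []
--     placed = []          # pivot rows already fixed at positions 0..len(placed)-1
--     suffix = rows        # current values of the rows below them
--     c = 0
--     while c < N and suffix:
--         r = len(placed)
--         k = 0
--         while k < len(suffix) and not (suffix[k] >> c) & 1:
--             k += 1
--         if k == len(suffix):
--             c += 1
--             continue
--         if k:
--             p = r + k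
--             suffix[0], suffix[k] = suffix[k], suffix[0]
--             fwd.append([1, p // n, p % n, r // n, r % n])
--         pivrow = suffix[0]
--         rest = []
--         j = r + 1
--         for v in suffix[1:]:
--             if (v >> c) & 1:
--                 v ^= pivrow
--                 fwd.append([0, r // n, r % n, j // n, j % n])
--             rest.append(v)
--             j += 1
--         placed.append(pivrow)
--         piv.append((r, c))
--         suffix = rest
--         c += 1
--
--     rows = placed + suffix
--     rpiv = piv[::-1]
--     red = [0] * N        # red[i] = fully back-reduced value of row i
--     fired = [[] for _ in range(N)]
--     for i in range(N - 1, -1, -1):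
--         v = rows[i]
--         for r, c in rpiv:
--             if r <= i:
--                 break
--             if (v >> c) & 1:
--                 v ^= red[r]
--                 fired[i].append(r)
--         red[i] = v
--         # fired[i] already filled in place
--     bwd = [[0, r // n, r % n, i // n, i % n]
--            for r, _ in rpiv for i in range(r) if r in fired[i]]
--     return fwd, bwd
-- ===== Notes on version B (the rewrite author's own statement) =====
-- stated objective: faster
-- what changed: B packs rows into integer bitmasks, runs the forward phase as a descent over the shrinking suffix of unplaced rows (pivot found by splitting the suffix at the first set bit, eliminated rows rebuilt into a new suffix) instead of index loops over a mutable array, and transposes the backward phase to be row-major: each row is reduced independently against the already fully-reduced pivot rows, recording which pivots fired, and the op list is then emitted grouped per pivot in A's order.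
-- outside the precondition, e.g. on make_ops_n2([[1]], 0): A returns ([], []), B returns ([], []); on make_ops_n2([[1], [0, 0]], 1): A returns ([], []), B returns ([], [])
import Mathlib
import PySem

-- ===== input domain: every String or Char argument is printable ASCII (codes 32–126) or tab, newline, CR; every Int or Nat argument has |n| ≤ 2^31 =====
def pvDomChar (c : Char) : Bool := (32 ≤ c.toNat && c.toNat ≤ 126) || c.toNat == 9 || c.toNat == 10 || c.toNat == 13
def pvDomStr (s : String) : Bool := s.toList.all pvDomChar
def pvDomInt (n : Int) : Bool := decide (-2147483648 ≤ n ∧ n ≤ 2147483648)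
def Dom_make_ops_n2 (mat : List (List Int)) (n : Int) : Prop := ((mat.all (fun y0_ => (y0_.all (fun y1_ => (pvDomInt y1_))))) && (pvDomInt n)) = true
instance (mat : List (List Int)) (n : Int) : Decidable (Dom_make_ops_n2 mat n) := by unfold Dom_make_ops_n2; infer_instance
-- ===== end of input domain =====

-- B packs rows into integer bitmasks, runs the forward elimination as a descent
-- over the shrinking suffix of unplaced rows, and computes the backward pass
-- row-major (each row reduced independently against the fully reduced pivot
-- rows), regrouping the recorded ops per pivot; same return value as A.


-- ===== PORT A =====
-- A keeps rows as lists of ints: 'A[i][c] & 1' bit tests and a per-element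
-- list-comprehension XOR.  A[i][c] is ported with getD; inside Pre_ every such
-- index is in range, so getD is exactly Python's indexing there.
def pvBitRowA (row : List Int) (c : Nat) : Bool := PySem.Int.band (row.getD c 0) 1 == 1

def pvXorRowA (xs ys : List Int) : List Int := List.zipWith (fun x y => PySem.Int.bxor x y) xs ys

-- the recorded op [t, a//n, a%n, b//n, b%n] (shared row-op formatting of both Pythons)
def pvOp (t : Int) (a b : Nat) (n : Int) : List Int :=
  [t, PySem.Int.floordiv (a : Int) n, PySem.Int.mod (a : Int) n,
      PySem.Int.floordiv (b : Int) n, PySem.Int.mod (b : Int) n]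

-- A's inner elimination loop (same shape in its forward and backward passes):
-- for i in is: if A[i][c]&1: A[i] = [x^y for x,y in zip(A[i],A[r])]; ops.append([0,...])
def pvElimA (n : Int) (c r : Nat) (st : List (List Int) × List (List Int)) (is : List Nat) :
    List (List Int) × List (List Int) :=
  is.foldl (fun st i =>
    if pvBitRowA (st.1.getD i []) c then
      (st.1.set i (pvXorRowA (st.1.getD i []) (st.1.getD r [])), st.2 ++ [pvOp 0 r i n])
    else st) st

def pvFwdA (n : Int) (N : Nat) :
    List Nat → List (List Int) → List (List Int) → List (Nat × Nat) → Nat →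
      List (List Int) × List (List Int) × List (Nat × Nat)
  | [], A, fwd, piv, _ => (A, fwd, piv)
  | c :: cs, A, fwd, piv, r =>
    match (List.range' r (N - r)).find? (fun i => pvBitRowA (A.getD i []) c) with
    | none => pvFwdA n N cs A fwd piv r
    | some p =>
      let A1 := if p ≠ r then (A.set p (A.getD r [])).set r (A.getD p []) else A
      let fwd1 := if p ≠ r then fwd ++ [pvOp 1 p r n] else fwd
      let st2 := pvElimA n c r (A1, fwd1) (List.range' (r + 1) (N - (r + 1)))
      if r + 1 = N then (st2.1, st2.2, piv ++ [(r, c)])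
      else pvFwdA n N cs st2.1 st2.2 (piv ++ [(r, c)]) (r + 1)

def make_ops_n2 (mat : List (List Int)) (n : Int) : List (List Int) × List (List Int) :=
  let A := mat.map (fun row => row)        -- A = [row[:] for row in mat]
  let N := A.length
  let st := pvFwdA n N (List.range N) A [] [] 0
  -- for r,c in reversed(piv): the same inner elimination loop over range(r)
  let bk := (st.2.2.reverse).foldl (fun st rc => pvElimA n rc.2 rc.1 st (List.range rc.1)) (st.1, [])
  (st.2.1, bk.2)

-- ===== PORT B =====
-- B: rows as Nat bitmasks (m |= (x & 1) << j)
def pvPackB (row : List Int) : Nat :=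
  (row.foldl (fun mj x => (mj.1 ||| ((PySem.Int.band x 1).toNat <<< mj.2), mj.2 + 1))
    ((0 : Nat), (0 : Nat))).1

def pvBit (v c : Nat) : Bool := (v >>> c) &&& 1 == 1

-- while k < len(suffix) and not (suffix[k] >> c) & 1: k += 1
def pvScanK (c : Nat) : List Nat → Nat
  | [] => 0
  | v :: vs => if pvBit v c then 0 else pvScanK c vs + 1

-- the forward while-loop: placed = pivot rows already fixed, suffix = rows below
def pvFwdB (n : Int) (N : Nat) (c : Nat) (placed suffix : List Nat)
    (fwd : List (List Int)) (piv : List (Nat × Nat)) :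
    List Nat × List (List Int) × List (Nat × Nat) :=
  if _hc : c < N then
    if _hs : suffix = [] then (placed ++ suffix, fwd, piv)
    else
      let r := placed.length
      let k := pvScanK c suffix
      if k = suffix.length then pvFwdB n N (c + 1) placed suffix fwd piv
      else
        let suffix1 := if k ≠ 0 then (suffix.set 0 (suffix.getD k 0)).set k (suffix.getD 0 0) else suffix
        let fwd1 := if k ≠ 0 then fwd ++ [pvOp 1 (r + k) r n] else fwd
        let pivrow := suffix1.getD 0 0
        let st := (suffix1.drop 1).foldl (fun st v =>
            if pvBit v c then (st.1 + 1, st.2.1 ++ [v ^^^ pivrow], st.2.2 ++ [pvOp 0 r st.1 n])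
            else (st.1 + 1, st.2.1 ++ [v], st.2.2)) (r + 1, ([] : List Nat), fwd1)
        pvFwdB n N (c + 1) (placed ++ [pivrow]) st.2.1 st.2.2 (piv ++ [(r, c)])
  else (placed ++ suffix, fwd, piv)
  termination_by N - c

-- inner loop of the row-major backward pass: walk the descending pivot list,
-- break at the first pivot r <= i, xor with the reduced pivot row, record r
def pvBwdRow (i : Nat) (red : List Nat) : List (Nat × Nat) → Nat → List Nat → Nat × List Nat
  | [], v, f => (v, f)
  | (r, c) :: ps, v, f =>
    if r ≤ i then (v, f)
    else if pvBit v c then pvBwdRow i red ps (v ^^^ red.getD r 0) (f ++ [r])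
    else pvBwdRow i red ps v f

-- for i in range(N-1, -1, -1): reduce row i, store red[i] and fired[i]
def pvBwdOuter (rpiv : List (Nat × Nat)) (rows : List Nat) :
    Nat → List Nat × List (List Nat) → List Nat × List (List Nat)
  | 0, st => st
  | k + 1, st =>
    let vf := pvBwdRow k st.1 rpiv (rows.getD k 0) []
    pvBwdOuter rpiv rows k (st.1.set k vf.1, st.2.set k vf.2)

def make_ops_n2_alt (mat : List (List Int)) (n : Int) : List (List Int) × List (List Int) :=
  let N := mat.length
  let rows := mat.map pvPackB
  let st := pvFwdB n N 0 [] rows [] []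
  let rpiv := st.2.2.reverse
  let rf := pvBwdOuter rpiv st.1 N (List.replicate N 0, List.replicate N [])
  -- bwd = [[0,...] for r,_ in rpiv for i in range(r) if r in fired[i]]
  let bwd := rpiv.flatMap (fun rc =>
      ((List.range rc.1).filter (fun i => (rf.2.getD i []).contains rc.1)).map
        (fun i => pvOp 0 rc.1 i n))
  (st.2.1, bwd)

-- ===== PRECONDITION & SPEC =====
-- Pre_ excludes n = 0, on which A raises ZeroDivisionError as soon as any row
-- operation is recorded, and matrices with a row shorter than the number of rows,
-- on which A's column accesses A[i][c] can raise IndexError.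
def Pre_make_ops_n2 (mat : List (List Int)) (n : Int) : Prop :=
  n ≠ 0 ∧ ∀ row ∈ mat, mat.length ≤ row.length
instance (mat : List (List Int)) (n : Int) : Decidable (Pre_make_ops_n2 mat n) := by
  unfold Pre_make_ops_n2; infer_instance

def pvWitness_make_ops_n2 : List (List Int) × Int := ([[1, 0], [1, 1]], 2)

def Spec_make_ops_n2 (mat : List (List Int)) (n : Int) (out : List (List Int) × List (List Int)) : Prop := out = make_ops_n2_alt mat n
instance (mat : List (List Int)) (n : Int) (out : List (List Int) × List (List Int)) : Decidable (Spec_make_ops_n2 mat n out) := by unfold Spec_make_ops_n2; infer_instance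

-- ===== CLAIM (what is proved, stated in full; the proofs are below) =====
def Claim_equal_make_ops_n2 : Prop := ∀ (mat : List (List Int)) (n : Int), Dom_make_ops_n2 mat n → Pre_make_ops_n2 mat n → Spec_make_ops_n2 mat n (make_ops_n2 mat n)

-- ===== LEMMAS AND PROOFS =====

-- proof-side intermediate: A's algorithm on bitmask rows (index-loop, pivot-major)
def pvMaskB (row : List Int) : Nat :=
  (row.foldl (fun mj x =>
      (if PySem.Int.band x 1 == 1 then mj.1 ||| (1 <<< mj.2) else mj.1, mj.2 + 1))
    ((0 : Nat), (0 : Nat))).1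

def pvBitB (rows : List Nat) (i c : Nat) : Bool := (rows.getD i 0 >>> c) &&& 1 == 1

def pvElimB (n : Int) (c r : Nat) (st : List Nat × List (List Int)) (is : List Nat) :
    List Nat × List (List Int) :=
  is.foldl (fun st i =>
    if pvBitB st.1 i c then
      (st.1.set i (st.1.getD i 0 ^^^ st.1.getD r 0), st.2 ++ [pvOp 0 r i n])
    else st) st

def pvFwdN (n : Int) (N : Nat) :
    List Nat → List Nat → List (List Int) → List (Nat × Nat) → Nat →
      List Nat × List (List Int) × List (Nat × Nat)
  | [], rows, fwd, piv, _ => (rows, fwd, piv)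
  | c :: cs, rows, fwd, piv, r =>
    match (List.range' r (N - r)).find? (fun i => pvBitB rows i c) with
    | none => pvFwdN n N cs rows fwd piv r
    | some p =>
      let rows1 := if p ≠ r then (rows.set p (rows.getD r 0)).set r (rows.getD p 0) else rows
      let fwd1 := if p ≠ r then fwd ++ [pvOp 1 p r n] else fwd
      let st2 := pvElimB n c r (rows1, fwd1) (List.range' (r + 1) (N - (r + 1)))
      if r + 1 = N then (st2.1, st2.2, piv ++ [(r, c)])
      else pvFwdN n N cs st2.1 st2.2 (piv ++ [(r, c)]) (r + 1)

-- relation between the two row representations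
def pvRel (N : Nat) (A : List (List Int)) (rows : List Nat) : Prop :=
  A.length = N ∧ rows.length = N ∧
  ∀ i, i < N → (N ≤ (A.getD i []).length ∧ ∀ j, j < N → pvBitRowA (A.getD i []) j = pvBitB rows i j)

theorem pv_band_one_eq (x : Int) : PySem.Int.band x 1 = x % 2 := by
  rw [PySem.Int.band_one, PySem.Int.mod_eq_emod_of_pos (by norm_num)]

theorem pv_natpar (a b : Nat) : (a ^^^ b) % 2 = (a % 2 + b % 2) % 2 := by
  have h := Nat.testBit_xor a b 0
  simp only [Nat.testBit_zero] at h
  rcases Nat.mod_two_eq_zero_or_one a with ha | ha <;>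
    rcases Nat.mod_two_eq_zero_or_one b with hb | hb <;>
      rcases Nat.mod_two_eq_zero_or_one (a ^^^ b) with hc | hc <;>
        simp [ha, hb, hc] at h ⊢ <;> omega

theorem pv_bxor_emod_two (x y : Int) :
    PySem.Int.bxor x y % 2 = if x % 2 = y % 2 then 0 else 1 := by
  by_cases hx : 0 ≤ x <;> by_cases hy : 0 ≤ y
  · have hz : PySem.Int.bxor x y = ((x.toNat ^^^ y.toNat : Nat) : Int) := by
      simp [PySem.Int.bxor, hx, hy]
    have hu := pv_natpar x.toNat y.toNat
    have h1 : ((x.toNat : Int)) = x := Int.toNat_of_nonneg hx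
    have h2 : ((y.toNat : Int)) = y := Int.toNat_of_nonneg hy
    rw [hz]; split_ifs <;> omega
  · have hz : PySem.Int.bxor x y = -((x.toNat ^^^ (-y - 1).toNat : Nat) : Int) - 1 := by
      simp [PySem.Int.bxor, hx, hy]
    have hu := pv_natpar x.toNat (-y - 1).toNat
    have h1 : ((x.toNat : Int)) = x := Int.toNat_of_nonneg hx
    have h2 : (((-y - 1).toNat : Int)) = -y - 1 := Int.toNat_of_nonneg (by omega)
    rw [hz]; split_ifs <;> omega
  · have hz : PySem.Int.bxor x y = -(((-x - 1).toNat ^^^ y.toNat : Nat) : Int) - 1 := by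
      simp [PySem.Int.bxor, hx, hy]
    have hu := pv_natpar (-x - 1).toNat y.toNat
    have h1 : (((-x - 1).toNat : Int)) = -x - 1 := Int.toNat_of_nonneg (by omega)
    have h2 : ((y.toNat : Int)) = y := Int.toNat_of_nonneg hy
    rw [hz]; split_ifs <;> omega
  · have hz : PySem.Int.bxor x y = (((-x - 1).toNat ^^^ (-y - 1).toNat : Nat) : Int) := by
      simp [PySem.Int.bxor, hx, hy]
    have hu := pv_natpar (-x - 1).toNat (-y - 1).toNat
    have h1 : (((-x - 1).toNat : Int)) = -x - 1 := Int.toNat_of_nonneg (by omega)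
    have h2 : (((-y - 1).toNat : Int)) = -y - 1 := Int.toNat_of_nonneg (by omega)
    rw [hz]; split_ifs <;> omega

theorem pv_parity_bxor (x y : Int) :
    (PySem.Int.band (PySem.Int.bxor x y) 1 == 1)
      = ((PySem.Int.band x 1 == 1) ^^ (PySem.Int.band y 1 == 1)) := by
  simp only [pv_band_one_eq, pv_bxor_emod_two]
  rcases Int.emod_two_eq x with h1 | h1 <;> rcases Int.emod_two_eq y with h2 | h2 <;>
    simp [h1, h2]

theorem pv_getD_set {α : Type} (l : List α) (i j : Nat) (a d : α) :
    (l.set i a).getD j d = if i = j ∧ i < l.length then a else l.getD j d := by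
  rw [List.getD_eq_getElem?_getD, List.getD_eq_getElem?_getD, List.getElem?_set]
  by_cases h1 : i = j
  · subst h1
    by_cases h2 : i < l.length
    · simp [h2]
    · have : l[i]? = none := List.getElem?_eq_none (by omega)
      simp [h2, this]
  · simp [h1]

theorem pv_find?_congr {α : Type} (l : List α) (p q : α → Bool)
    (h : ∀ a ∈ l, p a = q a) : l.find? p = l.find? q := by
  induction l with
  | nil => rfl
  | cons a l ih =>
    have ha := h a (by simp)
    cases hqa : q a with
    | true =>
      rw [List.find?_cons_of_pos (by rw [ha, hqa]), List.find?_cons_of_pos hqa]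
    | false =>
      rw [List.find?_cons_of_neg (by rw [ha, hqa]; simp), List.find?_cons_of_neg (by simp [hqa]),
        ih (fun x hx => h x (by simp [hx]))]

theorem pv_bitB_testBit (rows : List Nat) (i c : Nat) :
    pvBitB rows i c = (rows.getD i 0).testBit c := by
  have h : (rows.getD i 0).testBit c = ((rows.getD i 0 >>> c).testBit 0) := by
    rw [Nat.testBit_shiftRight, Nat.add_zero]
  rw [show pvBitB rows i c = ((rows.getD i 0 >>> c) % 2 == 1) from by
        rw [show pvBitB rows i c = ((rows.getD i 0 >>> c) &&& 1 == 1) from rfl, Nat.and_one_is_mod]]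
  rw [h, Nat.testBit_zero]
  rcases Nat.mod_two_eq_zero_or_one (rows.getD i 0 >>> c) with h2 | h2 <;> rw [h2] <;> decide

theorem pv_testBit_one (d : Nat) : Nat.testBit 1 d = decide (d = 0) := by
  cases d with
  | zero => decide
  | succ d =>
    exact Nat.testBit_lt_two_pow (by exact Nat.one_lt_two_pow (by omega))

theorem pv_bitRowA_nil (k : Nat) : pvBitRowA [] k = false := by
  simp [pvBitRowA, pv_band_one_eq]

theorem pv_bitRowA_cons_zero (x : Int) (xs : List Int) :
    pvBitRowA (x :: xs) 0 = (PySem.Int.band x 1 == 1) := rfl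

theorem pv_bitRowA_cons_succ (x : Int) (xs : List Int) (d : Nat) :
    pvBitRowA (x :: xs) (d + 1) = pvBitRowA xs d := rfl

theorem pv_mask_aux (row : List Int) : ∀ (m j k : Nat),
    ((row.foldl (fun mj x =>
        (if PySem.Int.band x 1 == 1 then mj.1 ||| (1 <<< mj.2) else mj.1, mj.2 + 1)) (m, j)).1).testBit k
      = (m.testBit k || (decide (j ≤ k) && pvBitRowA row (k - j))) := by
  induction row with
  | nil => intro m j k; simp [pv_bitRowA_nil]
  | cons x xs ih =>
    intro m j k
    simp only [List.foldl_cons]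
    rw [ih]
    rcases Nat.lt_trichotomy k j with hk | hk | hk
    · have h1 : ¬ (j ≤ k) := by omega
      have h2 : ¬ (j + 1 ≤ k) := by omega
      cases hx : (PySem.Int.band x 1 == 1) <;>
        simp [hx, h1, h2, Nat.testBit_or, Nat.testBit_shiftLeft, Nat.not_le.mpr hk]
    · subst hk
      have h2 : ¬ (k + 1 ≤ k) := by omega
      cases hx : (PySem.Int.band x 1 == 1) <;>
        simp [hx, h2, Nat.testBit_or, Nat.testBit_shiftLeft, pv_testBit_one,
          pv_bitRowA_cons_zero, Bool.or_comm, Bool.or_assoc]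
    · have h1 : j ≤ k := by omega
      have h2 : j + 1 ≤ k := by omega
      have h3 : k - j = (k - (j + 1)) + 1 := by omega
      have h4 : ¬ (k - j = 0) := by omega
      cases hx : (PySem.Int.band x 1 == 1) <;>
        simp [hx, h1, h2, h3, Nat.testBit_or, Nat.testBit_shiftLeft, pv_testBit_one, h4,
          pv_bitRowA_cons_succ, Bool.or_assoc]

theorem pv_mask_testBit (row : List Int) (k : Nat) :
    (pvMaskB row).testBit k = pvBitRowA row k := by
  have h := pv_mask_aux row 0 0 k
  simpa [pvMaskB] using h

-- B's pack loop computes the same mask as pvMaskB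
theorem pv_packB_eq (row : List Int) : pvPackB row = pvMaskB row := by
  suffices h : ∀ m j : Nat,
      (row.foldl (fun mj x => (mj.1 ||| ((PySem.Int.band x 1).toNat <<< mj.2), mj.2 + 1)) (m, j))
        = (row.foldl (fun mj x =>
            (if PySem.Int.band x 1 == 1 then mj.1 ||| (1 <<< mj.2) else mj.1, mj.2 + 1)) (m, j)) by
    unfold pvPackB pvMaskB
    rw [h]
  induction row with
  | nil => intro m j; rfl
  | cons x xs ih =>
    intro m j
    simp only [List.foldl_cons]
    have hb := pv_band_one_eq x
    rcases Int.emod_two_eq x with h1 | h1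
    · have : PySem.Int.band x 1 = 0 := by omega
      rw [this]
      simp only [Int.toNat_zero, Nat.zero_shiftLeft, Nat.or_zero]
      rw [show ((0 : Int) == 1) = false from rfl]
      simp only [Bool.false_eq_true, if_false]
      exact ih m (j + 1)
    · have : PySem.Int.band x 1 = 1 := by omega
      rw [this]
      rw [show ((1 : Int) == 1) = true from rfl]
      simp only [if_true, Int.toNat_one]
      exact ih (m ||| 1 <<< j) (j + 1)

theorem pv_bit_xorRow (xs ys : List Int) (j : Nat) (hx : j < xs.length) (hy : j < ys.length) :
    pvBitRowA (pvXorRowA xs ys) j = (pvBitRowA xs j ^^ pvBitRowA ys j) := by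
  have hz : j < (pvXorRowA xs ys).length := by
    simp [pvXorRowA, List.length_zipWith]; omega
  unfold pvBitRowA
  rw [List.getD_eq_getElem _ _ hz, List.getD_eq_getElem _ _ hx, List.getD_eq_getElem _ _ hy]
  rw [show (pvXorRowA xs ys)[j]'hz = PySem.Int.bxor xs[j] ys[j] from by
    simp [pvXorRowA, List.getElem_zipWith]]
  exact pv_parity_bxor _ _

theorem pv_getD_swap {α : Type} (l : List α) (p r : Nat) (d : α) (i : Nat)
    (hp : p < l.length) (hr : r < l.length) :
    ((l.set p (l.getD r d)).set r (l.getD p d)).getD i d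
      = if r = i then l.getD p d else if p = i then l.getD r d else l.getD i d := by
  rw [pv_getD_set, pv_getD_set]
  by_cases h1 : r = i <;> by_cases h2 : p = i <;>
      simp [h1, h2, List.length_set, hp, hr] <;>
    (intro h3; exact absurd h3 (by omega))

theorem pv_rel_update (N : Nat) (A : List (List Int)) (rows : List Nat) (i r : Nat)
    (hrel : pvRel N A rows) (hi : i < N) (hr : r < N) (hir : i ≠ r) :
    pvRel N (A.set i (pvXorRowA (A.getD i []) (A.getD r [])))
      (rows.set i (rows.getD i 0 ^^^ rows.getD r 0)) := by
  obtain ⟨hA, hR, hbits⟩ := hrel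
  refine ⟨by simp [hA], by simp [hR], ?_⟩
  intro i' hi'
  have hiA : i < A.length := by omega
  have hiR : i < rows.length := by omega
  constructor
  · by_cases h : i = i'
    · subst h
      rw [pv_getD_set, if_pos ⟨rfl, hiA⟩]
      have h1 := (hbits i hi).1
      have h2 := (hbits r hr).1
      have h3 : (pvXorRowA (A.getD i []) (A.getD r [])).length
          = min (A.getD i []).length (A.getD r []).length := by
        simp [pvXorRowA, List.length_zipWith]
      omega
    · rw [pv_getD_set, if_neg (by tauto)]
      exact (hbits i' hi').1
  · intro j hj
    rw [pv_bitB_testBit, pv_getD_set, pv_getD_set]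
    by_cases h : i = i'
    · subst h
      rw [if_pos ⟨rfl, hiA⟩, if_pos ⟨rfl, hiR⟩]
      rw [pv_bit_xorRow _ _ j (by have := (hbits i hi).1; omega) (by have := (hbits r hr).1; omega)]
      rw [Nat.testBit_xor]
      rw [(hbits i hi).2 j hj, (hbits r hr).2 j hj, pv_bitB_testBit, pv_bitB_testBit]
    · rw [if_neg (by tauto), if_neg (by tauto)]
      rw [(hbits i' hi').2 j hj, pv_bitB_testBit]

theorem pv_rel_swap (N : Nat) (A : List (List Int)) (rows : List Nat) (p r : Nat)
    (hrel : pvRel N A rows) (hp : p < N) (hr : r < N) :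
    pvRel N ((A.set p (A.getD r [])).set r (A.getD p []))
      ((rows.set p (rows.getD r 0)).set r (rows.getD p 0)) := by
  obtain ⟨hA, hR, hbits⟩ := hrel
  refine ⟨by simp [hA], by simp [hR], ?_⟩
  intro i hi
  constructor
  · rw [pv_getD_swap _ _ _ _ _ (by omega : p < A.length) (by omega)]
    rcases eq_or_ne r i with h1 | h1
    · rw [if_pos h1]
      exact (hbits p hp).1
    · rw [if_neg h1]
      rcases eq_or_ne p i with h2 | h2
      · rw [if_pos h2]
        exact (hbits r hr).1
      · rw [if_neg h2]
        exact (hbits i hi).1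
  · intro j hj
    rw [pv_getD_swap _ _ _ _ _ (by omega : p < A.length) (by omega)]
    rw [pv_bitB_testBit, pv_getD_swap _ _ _ _ _ (by omega : p < rows.length) (by omega)]
    rcases eq_or_ne r i with h1 | h1
    · rw [if_pos h1, if_pos h1, (hbits p hp).2 j hj, pv_bitB_testBit]
    · rw [if_neg h1, if_neg h1]
      rcases eq_or_ne p i with h2 | h2
      · rw [if_pos h2, if_pos h2, (hbits r hr).2 j hj, pv_bitB_testBit]
      · rw [if_neg h2, if_neg h2, (hbits i hi).2 j hj, pv_bitB_testBit]

theorem pv_elimA_cons (n : Int) (c r : Nat) (st : List (List Int) × List (List Int))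
    (i : Nat) (is : List Nat) :
    pvElimA n c r st (i :: is)
      = pvElimA n c r
          (if pvBitRowA (st.1.getD i []) c then
            (st.1.set i (pvXorRowA (st.1.getD i []) (st.1.getD r [])), st.2 ++ [pvOp 0 r i n])
          else st) is := rfl

theorem pv_elimB_cons (n : Int) (c r : Nat) (st : List Nat × List (List Int))
    (i : Nat) (is : List Nat) :
    pvElimB n c r st (i :: is)
      = pvElimB n c r
          (if pvBitB st.1 i c then
            (st.1.set i (st.1.getD i 0 ^^^ st.1.getD r 0), st.2 ++ [pvOp 0 r i n])
          else st) is := rfl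

theorem pv_elim_sim (n : Int) (N c r : Nat) (hr : r < N) (hc : c < N) :
    ∀ (is : List Nat) (A : List (List Int)) (rows : List Nat) (ops : List (List Int)),
      pvRel N A rows → (∀ i ∈ is, i < N ∧ i ≠ r) →
      (pvElimA n c r (A, ops) is).2 = (pvElimB n c r (rows, ops) is).2 ∧
      pvRel N (pvElimA n c r (A, ops) is).1 (pvElimB n c r (rows, ops) is).1 := by
  intro is
  induction is with
  | nil =>
    intro A rows ops hrel _
    exact ⟨rfl, hrel⟩
  | cons i is ih =>
    intro A rows ops hrel his
    obtain ⟨hi, hir⟩ := his i (by simp)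
    have hbit : pvBitRowA (A.getD i []) c = pvBitB rows i c := (hrel.2.2 i hi).2 c hc
    rw [pv_elimA_cons, pv_elimB_cons]
    cases hb : pvBitB rows i c with
    | false =>
      rw [show pvBitRowA ((A, ops).1.getD i []) c = false from hbit.trans hb]
      rw [if_neg (by simp), if_neg (by simp [hb])]
      exact ih A rows ops hrel (fun x hx => his x (by simp [hx]))
    | true =>
      rw [show pvBitRowA ((A, ops).1.getD i []) c = true from hbit.trans hb]
      rw [if_pos (by simp), if_pos (by simp [hb])]
      exact ih _ _ _ (pv_rel_update N A rows i r hrel hi hr hir)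
        (fun x hx => his x (by simp [hx]))

theorem pv_fwd_sim (n : Int) (N : Nat) :
    ∀ (cs : List Nat) (A : List (List Int)) (rows : List Nat) (fwd : List (List Int))
      (piv : List (Nat × Nat)) (r : Nat),
      pvRel N A rows → (∀ c ∈ cs, c < N) → r ≤ N →
      (pvFwdA n N cs A fwd piv r).2.1 = (pvFwdN n N cs rows fwd piv r).2.1 ∧
      (pvFwdA n N cs A fwd piv r).2.2 = (pvFwdN n N cs rows fwd piv r).2.2 ∧
      pvRel N (pvFwdA n N cs A fwd piv r).1 (pvFwdN n N cs rows fwd piv r).1 := by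
  intro cs
  induction cs with
  | nil =>
    intro A rows fwd piv r hrel _ _
    exact ⟨rfl, rfl, hrel⟩
  | cons c cs ih =>
    intro A rows fwd piv r hrel hcs hrN
    have hc : c < N := hcs c (by simp)
    have hfind : (List.range' r (N - r)).find? (fun i => pvBitRowA (A.getD i []) c)
        = (List.range' r (N - r)).find? (fun i => pvBitB rows i c) := by
      refine pv_find?_congr _ _ _ (fun i himem => ?_)
      have hm := List.mem_range'_1.mp himem
      exact (hrel.2.2 i (by omega)).2 c hc
    cases hA : (List.range' r (N - r)).find? (fun i => pvBitRowA (A.getD i []) c) with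
    | none =>
      have hB : (List.range' r (N - r)).find? (fun i => pvBitB rows i c) = none :=
        hfind ▸ hA
      simp only [pvFwdA, pvFwdN, hA, hB]
      exact ih A rows fwd piv r hrel (fun x hx => hcs x (by simp [hx])) hrN
    | some p =>
      have hB : (List.range' r (N - r)).find? (fun i => pvBitB rows i c) = some p :=
        hfind ▸ hA
      have hmem := List.mem_range'_1.mp (List.mem_of_find?_eq_some hA)
      have hpN : p < N := by omega
      have hrn : r < N := by omega
      simp only [pvFwdA, pvFwdN, hA, hB]
      by_cases hpr : p = r
      · simp only [hpr, ne_eq, not_true_eq_false, if_neg (by simp : ¬ (False : Prop))]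
        have hel := pv_elim_sim n N c r hrn hc (List.range' (r + 1) (N - (r + 1))) A rows fwd
          hrel (fun i hi => by have := List.mem_range'_1.mp hi; omega)
        by_cases hstop : r + 1 = N
        · rw [if_pos hstop, if_pos hstop]
          exact ⟨hel.1, rfl, hel.2⟩
        · simp only [if_neg hstop]
          rw [hel.1]
          exact ih _ _ _ _ _ hel.2 (fun x hx => hcs x (by simp [hx])) (by omega)
      · simp only [ne_eq, hpr, not_false_eq_true, if_pos]
        have hrel1 := pv_rel_swap N A rows p r hrel hpN hrn
        have hel := pv_elim_sim n N c r hrn hc (List.range' (r + 1) (N - (r + 1)))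
          ((A.set p (A.getD r [])).set r (A.getD p []))
          ((rows.set p (rows.getD r 0)).set r (rows.getD p 0))
          (fwd ++ [pvOp 1 p r n]) hrel1
          (fun i hi => by have := List.mem_range'_1.mp hi; omega)
        by_cases hstop : r + 1 = N
        · rw [if_pos hstop, if_pos hstop]
          exact ⟨hel.1, rfl, hel.2⟩
        · simp only [if_neg hstop]
          rw [hel.1]
          exact ih _ _ _ _ _ hel.2 (fun x hx => hcs x (by simp [hx])) (by omega)

theorem pv_fwd_piv_bound (n : Int) (N : Nat) :
    ∀ (cs : List Nat) (A : List (List Int)) (fwd : List (List Int))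
      (piv : List (Nat × Nat)) (r : Nat),
      (∀ c ∈ cs, c < N) → r ≤ N → (∀ x ∈ piv, x.1 < N ∧ x.2 < N) →
      ∀ x ∈ (pvFwdA n N cs A fwd piv r).2.2, x.1 < N ∧ x.2 < N := by
  intro cs
  induction cs with
  | nil =>
    intro A fwd piv r _ _ hpiv
    exact hpiv
  | cons c cs ih =>
    intro A fwd piv r hcs hrN hpiv
    have hc : c < N := hcs c (by simp)
    cases hA : (List.range' r (N - r)).find? (fun i => pvBitRowA (A.getD i []) c) with
    | none =>
      simp only [pvFwdA, hA]
      exact ih A fwd piv r (fun x hx => hcs x (by simp [hx])) hrN hpiv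
    | some p =>
      have hmem := List.mem_range'_1.mp (List.mem_of_find?_eq_some hA)
      have hrn : r < N := by omega
      have hpiv' : ∀ x ∈ piv ++ [(r, c)], x.1 < N ∧ x.2 < N := by
        intro x hx
        rcases List.mem_append.mp hx with h | h
        · exact hpiv x h
        · simp at h
          subst h
          exact ⟨hrn, hc⟩
      simp only [pvFwdA, hA]
      by_cases hstop : r + 1 = N
      · rw [if_pos hstop]
        exact hpiv'
      · simp only [if_neg hstop]
        exact ih _ _ _ _ (fun x hx => hcs x (by simp [hx])) (by omega) hpiv'

theorem pv_bwd_sim (n : Int) (N : Nat) :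
    ∀ (pivs : List (Nat × Nat)) (A : List (List Int)) (rows : List Nat) (ops : List (List Int)),
      pvRel N A rows → (∀ x ∈ pivs, x.1 < N ∧ x.2 < N) →
      (pivs.foldl (fun st rc => pvElimA n rc.2 rc.1 st (List.range rc.1)) (A, ops)).2
        = (pivs.foldl (fun st rc => pvElimB n rc.2 rc.1 st (List.range rc.1)) (rows, ops)).2 := by
  intro pivs
  induction pivs with
  | nil =>
    intro A rows ops _ _
    rfl
  | cons rc pivs ih =>
    intro A rows ops hrel hpiv
    obtain ⟨hr, hc⟩ := hpiv rc (by simp)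
    have hel := pv_elim_sim n N rc.2 rc.1 hr hc (List.range rc.1) A rows ops hrel
      (fun i hi => by have := List.mem_range.mp hi; omega)
    have h4 : pvElimB n rc.2 rc.1 (rows, ops) (List.range rc.1)
        = ((pvElimB n rc.2 rc.1 (rows, ops) (List.range rc.1)).1,
           (pvElimA n rc.2 rc.1 (A, ops) (List.range rc.1)).2) := by
      rw [hel.1]
    rw [List.foldl_cons, List.foldl_cons, h4]
    exact ih _ _ _ hel.2 (fun x hx => hpiv x (by simp [hx]))

theorem pv_rel_init (mat : List (List Int)) (h : ∀ row ∈ mat, mat.length ≤ row.length) :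
    pvRel mat.length (mat.map (fun row => row)) (mat.map pvMaskB) := by
  refine ⟨by simp, by simp, ?_⟩
  intro i hi
  have hlen : i < (mat.map (fun row : List Int => row)).length := by simpa
  have hlen2 : i < (mat.map pvMaskB).length := by simpa
  have e1 : (mat.map (fun row : List Int => row)).getD i [] = mat[i] := by
    rw [List.getD_eq_getElem _ _ hlen]
    simp
  have e2 : (mat.map pvMaskB).getD i 0 = pvMaskB mat[i] := by
    rw [List.getD_eq_getElem _ _ hlen2]
    simp
  constructor
  · rw [e1]
    exact h mat[i] (List.getElem_mem hi)
  · intro j hj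
    rw [e1, pv_bitB_testBit, e2, pv_mask_testBit]

-- ===== new-B machinery: forward (suffix descent) and backward (row-major) =====

theorem pv_elimB_len (n : Int) (c r : Nat) :
    ∀ (is : List Nat) (st : List Nat × List (List Int)),
      (pvElimB n c r st is).1.length = st.1.length := by
  intro is
  induction is with
  | nil => intro st; rfl
  | cons i is ih =>
    intro st
    rw [pv_elimB_cons, ih]
    split <;> simp

theorem pv_fwdN_len (n : Int) (N : Nat) :
    ∀ (cs : List Nat) (rows : List Nat) (fwd : List (List Int)) (piv : List (Nat × Nat)) (r : Nat),
      (pvFwdN n N cs rows fwd piv r).1.length = rows.length := by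
  intro cs
  induction cs with
  | nil => intro rows fwd piv r; rfl
  | cons c cs ih =>
    intro rows fwd piv r
    cases hA : (List.range' r (N - r)).find? (fun i => pvBitB rows i c) with
    | none => simp only [pvFwdN, hA]; exact ih rows fwd piv r
    | some p =>
      simp only [pvFwdN, hA]
      by_cases hstop : r + 1 = N
      · rw [if_pos hstop]
        rw [pv_elimB_len]
        split <;> simp
      · rw [if_neg hstop, ih, pv_elimB_len]
        split <;> simp

theorem pv_fwdN_piv_incr (n : Int) (N : Nat) :
    ∀ (cs : List Nat) (rows : List Nat) (fwd : List (List Int)) (piv : List (Nat × Nat)) (r : Nat),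
      (∀ x ∈ piv, x.1 < r) → piv.Pairwise (fun a b => a.1 < b.1) →
      (pvFwdN n N cs rows fwd piv r).2.2.Pairwise (fun a b => a.1 < b.1) := by
  intro cs
  induction cs with
  | nil => intro rows fwd piv r _ hpw; exact hpw
  | cons c cs ih =>
    intro rows fwd piv r hb hpw
    cases hA : (List.range' r (N - r)).find? (fun i => pvBitB rows i c) with
    | none => simp only [pvFwdN, hA]; exact ih rows fwd piv r hb hpw
    | some p =>
      have hpw' : (piv ++ [(r, c)]).Pairwise (fun a b => a.1 < b.1) := by
        rw [List.pairwise_append]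
        exact ⟨hpw, List.pairwise_singleton _ _, by
          intro a ha b hbm
          simp at hbm
          rw [hbm]
          exact hb a ha⟩
      have hb' : ∀ x ∈ piv ++ [(r, c)], x.1 < r + 1 := by
        intro x hx
        rcases List.mem_append.mp hx with h | h
        · have := hb x h; omega
        · simp at h; rw [h]; omega
      simp only [pvFwdN, hA]
      by_cases hstop : r + 1 = N
      · rw [if_pos hstop]; exact hpw'
      · rw [if_neg hstop]
        exact ih _ _ _ (r + 1) hb' hpw'



-- list helpers
theorem pv_getD_append_r (l1 l2 : List Nat) (j : Nat) :
    (l1 ++ l2).getD (l1.length + j) 0 = l2.getD j 0 := by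
  induction l1 with
  | nil => simp
  | cons x xs ih => simpa [Nat.succ_add] using ih

theorem pv_getD_append_l (l1 l2 : List Nat) (r : Nat) (h : r < l1.length) :
    (l1 ++ l2).getD r 0 = l1.getD r 0 := by
  induction l1 generalizing r with
  | nil => simp at h
  | cons x xs ih =>
    cases r with
    | zero => rfl
    | succ r => simpa using ih r (by simpa using h)

theorem pv_set_append {α : Type} (l1 l2 : List α) (j : Nat) (a : α) :
    (l1 ++ l2).set (l1.length + j) a = l1 ++ l2.set j a := by
  induction l1 with
  | nil => simp
  | cons x xs ih => simpa [Nat.succ_add] using ih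


def pvG (c : Nat) (pivrow : Nat) : List Nat → List Nat
  | [] => []
  | v :: t => (if pvBit v c then v ^^^ pivrow else v) :: pvG c pivrow t

def pvH (n : Int) (c r : Nat) : List Nat → Nat → List (List Int)
  | [], _ => []
  | v :: t, j => (if pvBit v c then [pvOp 0 r j n] else []) ++ pvH n c r t (j + 1)

theorem pv_G_len (c pivrow : Nat) : ∀ t : List Nat, (pvG c pivrow t).length = t.length := by
  intro t
  induction t with
  | nil => rfl
  | cons v t ih => simp [pvG, ih]

theorem pv_foldF (n : Int) (c r : Nat) (pivrow : Nat) :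
    ∀ (t : List Nat) (j : Nat) (rest : List Nat) (fwd : List (List Int)),
      t.foldl (fun st v =>
          if pvBit v c then (st.1 + 1, st.2.1 ++ [v ^^^ pivrow], st.2.2 ++ [pvOp 0 r st.1 n])
          else (st.1 + 1, st.2.1 ++ [v], st.2.2)) (j, rest, fwd)
        = (j + t.length, rest ++ pvG c pivrow t, fwd ++ pvH n c r t j) := by
  intro t
  induction t with
  | nil => intro j rest fwd; simp [pvG, pvH]
  | cons v t ih =>
    intro j rest fwd
    rw [List.foldl_cons]
    by_cases hb : pvBit v c
    · rw [if_pos hb]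
      rw [ih]
      simp [pvG, pvH, hb]
      omega
    · rw [if_neg hb]
      rw [ih]
      simp [pvG, pvH, hb]
      omega

theorem pv_elim_prefix (n : Int) (c r : Nat) :
    ∀ (tail prefix_ : List Nat) (fwdAcc : List (List Int)), r < prefix_.length →
      pvElimB n c r (prefix_ ++ tail, fwdAcc) (List.range' prefix_.length tail.length)
        = (prefix_ ++ pvG c (prefix_.getD r 0) tail, fwdAcc ++ pvH n c r tail prefix_.length) := by
  intro tail
  induction tail with
  | nil => intro prefix_ fwdAcc hr; simp [pvG, pvH, pvElimB]
  | cons v t ih =>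
    intro prefix_ fwdAcc hr
    rw [show (v :: t).length = t.length + 1 from rfl, List.range'_succ, pv_elimB_cons]
    have hgd : (prefix_ ++ v :: t).getD prefix_.length 0 = v := by
      have := pv_getD_append_r prefix_ (v :: t) 0
      rwa [Nat.add_zero] at this
    have hbit : pvBitB (prefix_ ++ v :: t) prefix_.length c = pvBit v c := by
      show pvBit ((prefix_ ++ v :: t).getD prefix_.length 0) c = pvBit v c
      rw [hgd]
    have hgr : (prefix_ ++ v :: t).getD r 0 = prefix_.getD r 0 := pv_getD_append_l _ _ _ hr
    by_cases hb : pvBit v c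
    · rw [if_pos (by simpa [hbit] using hb)]
      have hset : (prefix_ ++ v :: t).set prefix_.length
            ((prefix_ ++ v :: t).getD prefix_.length 0 ^^^ (prefix_ ++ v :: t).getD r 0)
          = (prefix_ ++ [v ^^^ prefix_.getD r 0]) ++ t := by
        rw [hgd, hgr]
        have := pv_set_append prefix_ (v :: t) 0 (v ^^^ prefix_.getD r 0)
        rw [Nat.add_zero] at this
        rw [this]
        simp
      simp only [hset]
      have hlen1 : prefix_.length + 1 = (prefix_ ++ [v ^^^ prefix_.getD r 0]).length := by simp
      rw [hlen1, ih _ _ (by simp; omega)]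
      have hgr2 : (prefix_ ++ [v ^^^ prefix_.getD r 0]).getD r 0 = prefix_.getD r 0 :=
        pv_getD_append_l _ _ _ hr
      rw [hgr2]
      simp [pvG, pvH, hb]
    · rw [if_neg (by simpa [hbit] using hb)]
      have hlen1 : prefix_.length + 1 = (prefix_ ++ [v]).length := by simp
      rw [show prefix_ ++ v :: t = (prefix_ ++ [v]) ++ t from by simp]
      rw [hlen1, ih _ _ (by simp; omega)]
      have hgr2 : (prefix_ ++ [v]).getD r 0 = prefix_.getD r 0 := pv_getD_append_l _ _ _ hr
      rw [hgr2]
      simp [pvG, pvH, hb]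

theorem pv_fwdN_stall (n : Int) (N : Nat) :
    ∀ (cs : List Nat) (rows : List Nat) (fwd : List (List Int)) (piv : List (Nat × Nat)),
      pvFwdN n N cs rows fwd piv N = (rows, fwd, piv) := by
  intro cs
  induction cs with
  | nil => intro rows fwd piv; rfl
  | cons c cs ih =>
    intro rows fwd piv
    have h0 : N - N = 0 := Nat.sub_self N
    simp only [pvFwdN, h0, List.range'_zero, List.find?_nil]
    exact ih rows fwd piv

theorem pv_scan_le (c : Nat) : ∀ suffix : List Nat, pvScanK c suffix ≤ suffix.length := by
  intro suffix
  induction suffix with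
  | nil => exact Nat.le_refl 0
  | cons v vs ih =>
    rw [show pvScanK c (v :: vs) = if pvBit v c then 0 else pvScanK c vs + 1 from rfl]
    split
    · simp
    · simp only [List.length_cons]; omega

theorem pv_find_scan (c : Nat) :
    ∀ (suffix placed : List Nat),
      (List.range' placed.length suffix.length).find? (fun i => pvBitB (placed ++ suffix) i c)
        = if pvScanK c suffix = suffix.length then none
          else some (placed.length + pvScanK c suffix) := by
  intro suffix
  induction suffix with
  | nil => intro placed; simp [pvScanK]
  | cons v vs ih =>
    intro placed
    rw [show (v :: vs).length = vs.length + 1 from rfl, List.range'_succ]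
    have hbit : pvBitB (placed ++ v :: vs) placed.length c = pvBit v c := by
      show pvBit ((placed ++ v :: vs).getD placed.length 0) c = pvBit v c
      have := pv_getD_append_r placed (v :: vs) 0
      rw [Nat.add_zero] at this
      rw [this]
      rfl
    have hsc : pvScanK c (v :: vs) = if pvBit v c then 0 else pvScanK c vs + 1 := rfl
    by_cases hb : pvBit v c
    · rw [List.find?_cons_of_pos (by rw [hbit]; exact hb)]
      rw [hsc, if_pos hb]
      simp
    · rw [List.find?_cons_of_neg (by rw [hbit]; simpa using hb)]
      have h2 := ih (placed ++ [v])
      rw [show (placed ++ [v]).length = placed.length + 1 from by simp] at h2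
      rw [show (placed ++ [v]) ++ vs = placed ++ v :: vs from by simp] at h2
      rw [h2, hsc, if_neg hb]
      by_cases hk : pvScanK c vs = vs.length
      · rw [if_pos hk, if_pos (by omega)]
      · rw [if_neg hk, if_neg (by omega)]
        congr 1
        omega

theorem pv_swap_append (placed suffix : List Nat) (k : Nat) (hk : k < suffix.length)
    (hk0 : k ≠ 0) :
    ((placed ++ suffix).set (placed.length + k) ((placed ++ suffix).getD placed.length 0)).set
        placed.length ((placed ++ suffix).getD (placed.length + k) 0)
      = placed ++ ((suffix.set 0 (suffix.getD k 0)).set k (suffix.getD 0 0)) := by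
  have h0 : (placed ++ suffix).getD placed.length 0 = suffix.getD 0 0 := by
    have := pv_getD_append_r placed suffix 0
    rwa [Nat.add_zero] at this
  have hkk : (placed ++ suffix).getD (placed.length + k) 0 = suffix.getD k 0 :=
    pv_getD_append_r _ _ _
  rw [h0, hkk, pv_set_append]
  have h1 := pv_set_append placed (suffix.set k (suffix.getD 0 0)) 0 (suffix.getD k 0)
  rw [Nat.add_zero] at h1
  rw [h1]
  congr 1
  rw [List.set_comm]
  omega

theorem pv_fwdB_eq_fwdN_x (n : Int) (N : Nat) :
    ∀ (m c : Nat) (placed suffix : List Nat) (fwd : List (List Int)) (piv : List (Nat × Nat)),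
      N - c = m → placed.length + suffix.length = N →
      pvFwdB n N c placed suffix fwd piv
        = pvFwdN n N (List.range' c (N - c)) (placed ++ suffix) fwd piv placed.length := by
  intro m
  induction m with
  | zero =>
    intro c placed suffix fwd piv hm hlen
    have hc : ¬ c < N := by omega
    rw [pvFwdB, dif_neg hc, hm, List.range'_zero]
    rfl
  | succ m ih =>
    intro c placed suffix fwd piv hm hlen
    have hc : c < N := by omega
    have hrange : List.range' c (N - c) = c :: List.range' (c + 1) (N - (c + 1)) := by
      rw [show N - c = (N - (c + 1)) + 1 from by omega, List.range'_succ]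
    rw [pvFwdB, dif_pos hc, hrange]
    cases suffix with
    | nil =>
      rw [dif_pos rfl]
      have hplen : placed.length = N := by simpa using hlen
      rw [hplen, pv_fwdN_stall]
    | cons v vs =>
      rw [dif_neg (by simp)]
      simp only []
      have hlen2 : N - placed.length = (v :: vs).length := by
        simp only [List.length_cons] at hlen ⊢
        omega
      have hfind := pv_find_scan c (v :: vs) placed
      conv_rhs => rw [pvFwdN]
      rw [hlen2, hfind]
      by_cases hk : pvScanK c (v :: vs) = (v :: vs).length
      · rw [if_pos hk, if_pos hk]
        exact ih (c + 1) placed (v :: vs) fwd piv (by omega) hlen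
      · rw [if_neg hk, if_neg hk]
        simp only []
        have hklt : pvScanK c (v :: vs) < (v :: vs).length := by
          have := pv_scan_le c (v :: vs)
          omega
        -- suffix after the (possible) swap
        set k := pvScanK c (v :: vs) with hkdef
        set suffix1 := if k ≠ 0 then ((v :: vs).set 0 ((v :: vs).getD k 0)).set k ((v :: vs).getD 0 0)
          else v :: vs with hs1
        have hs1len : suffix1.length = vs.length + 1 := by
          rw [hs1]; split <;> simp
        obtain ⟨w, ws, hws⟩ : ∃ w ws, suffix1 = w :: ws := by
          cases h : suffix1 with
          | nil => rw [h] at hs1len; simp at hs1len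
          | cons a b => exact ⟨a, b, rfl⟩
        have hwslen : ws.length = vs.length := by
          rw [hws] at hs1len; simpa using hs1len
        -- the full row list after the (possible) swap is placed ++ suffix1
        have hrows1 :
            (if placed.length + k ≠ placed.length then
                ((placed ++ v :: vs).set (placed.length + k) ((placed ++ v :: vs).getD placed.length 0)).set
                  placed.length ((placed ++ v :: vs).getD (placed.length + k) 0)
              else placed ++ v :: vs)
              = placed ++ suffix1 := by
          rw [hs1]
          by_cases hk0 : k = 0
          · rw [if_neg (by omega), if_neg (by simp [hk0])]
          · rw [if_pos (by omega), if_pos hk0]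
            exact pv_swap_append placed (v :: vs) k hklt hk0
        have hfwd1 :
            (if placed.length + k ≠ placed.length then fwd ++ [pvOp 1 (placed.length + k) placed.length n]
              else fwd)
              = (if k ≠ 0 then fwd ++ [pvOp 1 (placed.length + k) placed.length n] else fwd) := by
          by_cases hk0 : k = 0
          · rw [if_neg (by omega), if_neg (by simp [hk0])]
          · rw [if_pos (by omega), if_pos hk0]
        rw [hrows1, hfwd1]
        set fwd1 := if k ≠ 0 then fwd ++ [pvOp 1 (placed.length + k) placed.length n] else fwd with hf1
        -- elimination: pvElimB on the full list = prefix ++ pvG, via pv_elim_prefix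
        have hgdw : (placed ++ [w]).getD placed.length 0 = w := by
          have := pv_getD_append_r placed [w] 0
          rwa [Nat.add_zero] at this
        have helim :
            pvElimB n c placed.length (placed ++ w :: ws, fwd1)
                (List.range' (placed.length + 1) (N - (placed.length + 1)))
              = ((placed ++ [w]) ++ pvG c w ws, fwd1 ++ pvH n c placed.length ws (placed.length + 1)) := by
          rw [show placed ++ w :: ws = (placed ++ [w]) ++ ws from by simp]
          rw [show N - (placed.length + 1) = ws.length from by
            simp only [List.length_cons] at hlen; omega]
          rw [show placed.length + 1 = (placed ++ [w]).length from by simp]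
          rw [pv_elim_prefix n c placed.length ws (placed ++ [w]) fwd1 (by simp)]
          rw [hgdw]
        -- B-side inner foldl via pv_foldF
        have hfold := pv_foldF n c placed.length (suffix1.getD 0 0) (suffix1.drop 1)
          (placed.length + 1) [] fwd1
        rw [hws] at hfold
        simp only [List.getD_cons_zero, List.drop_one, List.tail_cons] at hfold
        rw [hws]
        simp only [List.getD_cons_zero, List.drop_one, List.tail_cons]
        rw [hfold]
        simp only [List.nil_append]
        rw [helim]
        by_cases hstop : placed.length + 1 = N
        · rw [if_pos hstop]
          have hws0 : ws = [] := by
            have h5 : ws.length = 0 := by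
              simp only [List.length_cons] at hlen
              omega
            exact List.eq_nil_of_length_eq_zero h5
          subst hws0
          have := ih (c + 1) (placed ++ [w]) (pvG c w [])
            (fwd1 ++ pvH n c placed.length [] (placed.length + 1))
            (piv ++ [(placed.length, c)]) (by omega)
            (by simp [pvG]; omega)
          rw [this]
          rw [show (placed ++ [w]).length = N from by
            simp only [List.length_append, List.length_singleton]; omega]
          rw [pv_fwdN_stall]
        · rw [if_neg hstop]
          have := ih (c + 1) (placed ++ [w]) (pvG c w ws)
            (fwd1 ++ pvH n c placed.length ws (placed.length + 1))
            (piv ++ [(placed.length, c)]) (by omega)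
            (by rw [pv_G_len]; simp only [List.length_append, List.length_singleton];
                simp only [List.length_cons] at hlen; omega)
          rw [this]
          rw [show (placed ++ [w]).length = placed.length + 1 from by simp]



theorem pv_fwdB_eq_fwdN_w (n : Int) (N : Nat) :
    ∀ (c : Nat) (placed suffix : List Nat) (fwd : List (List Int)) (piv : List (Nat × Nat)),
      placed.length + suffix.length = N →
      pvFwdB n N c placed suffix fwd piv
        = pvFwdN n N (List.range' c (N - c)) (placed ++ suffix) fwd piv placed.length := by
  intro c placed suffix fwd piv hlen
  exact pv_fwdB_eq_fwdN_x n N (N - c) c placed suffix fwd piv rfl hlen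

def pvApplyP (rows : List Nat) (r c : Nat) : List Nat :=
  rows.mapIdx (fun i v => if i < r ∧ pvBit v c then v ^^^ rows.getD r 0 else v)

def pvApplyAll : List Nat → List (Nat × Nat) → List Nat
  | rows, [] => rows
  | rows, (r, c) :: ps => pvApplyAll (pvApplyP rows r c) ps

def pvFiredSpec : List Nat → Nat → List (Nat × Nat) → List Nat
  | _, _, [] => []
  | rows, i, (r, c) :: ps =>
    if r ≤ i then []
    else (if pvBit (rows.getD i 0) c then [r] else []) ++ pvFiredSpec (pvApplyP rows r c) i ps





theorem pv_firedSpec_cons (rows : List Nat) (i r c : Nat) (ps : List (Nat × Nat)) :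
    pvFiredSpec rows i ((r, c) :: ps)
      = if r ≤ i then []
        else (if pvBit (rows.getD i 0) c then [r] else [])
          ++ pvFiredSpec (pvApplyP rows r c) i ps := rfl

theorem pv_bwdRow_cons (i : Nat) (red : List Nat) (r c : Nat) (ps : List (Nat × Nat))
    (v : Nat) (f : List Nat) :
    pvBwdRow i red ((r, c) :: ps) v f
      = if r ≤ i then (v, f)
        else if pvBit v c then pvBwdRow i red ps (v ^^^ red.getD r 0) (f ++ [r])
        else pvBwdRow i red ps v f := rfl

theorem pv_bit_zero (c : Nat) : pvBit 0 c = false := by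
  simp [pvBit]

theorem pv_getD_eq_getElem (l : List Nat) (j : Nat) (h : j < l.length) :
    l.getD j 0 = l[j] := List.getD_eq_getElem l 0 h

theorem pv_getD_oob (l : List Nat) (j : Nat) (h : ¬ j < l.length) :
    l.getD j 0 = 0 := by
  rw [List.getD_eq_getElem?_getD, List.getElem?_eq_none (by omega)]
  rfl

theorem pv_applyP_len (rows : List Nat) (r c : Nat) :
    (pvApplyP rows r c).length = rows.length := by
  simp [pvApplyP]

theorem pv_applyP_getD (rows : List Nat) (r c i : Nat) :
    (pvApplyP rows r c).getD i 0
      = if i < r ∧ pvBit (rows.getD i 0) c then rows.getD i 0 ^^^ rows.getD r 0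
        else rows.getD i 0 := by
  by_cases hi : i < rows.length
  · have hi2 : i < (pvApplyP rows r c).length := by rw [pv_applyP_len]; exact hi
    rw [pv_getD_eq_getElem _ _ hi2, pv_getD_eq_getElem _ _ hi]
    simp only [pvApplyP, List.getElem_mapIdx]
  · have h0 : rows.getD i 0 = 0 := pv_getD_oob _ _ hi
    have h1 : (pvApplyP rows r c).getD i 0 = 0 := by
      apply pv_getD_oob
      rw [pv_applyP_len]
      exact hi
    rw [h0, h1, pv_bit_zero]
    exact (if_neg (by simp)).symm

theorem pv_applyP_getD_ge (rows : List Nat) (r c i : Nat) (h : r ≤ i) :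
    (pvApplyP rows r c).getD i 0 = rows.getD i 0 := by
  rw [pv_applyP_getD, if_neg (by omega)]

theorem pv_applyAll_getD_le (ps : List (Nat × Nat)) :
    ∀ (rows : List Nat) (i : Nat), (∀ p ∈ ps, p.1 ≤ i) →
      (pvApplyAll rows ps).getD i 0 = rows.getD i 0 := by
  induction ps with
  | nil => intro rows i _; rfl
  | cons p ps ih =>
    intro rows i h
    rw [show pvApplyAll rows (p :: ps) = pvApplyAll (pvApplyP rows p.1 p.2) ps from rfl,
      ih _ _ (fun q hq => h q (by simp [hq])), pv_applyP_getD_ge _ _ _ _ (h p (by simp))]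

theorem pv_elim_acc (n : Int) (c r : Nat) :
    ∀ (is : List Nat) (rows : List Nat) (ops : List (List Int)),
      pvElimB n c r (rows, ops) is
        = ((pvElimB n c r (rows, []) is).1, ops ++ (pvElimB n c r (rows, []) is).2) := by
  intro is
  induction is with
  | nil => intro rows ops; simp [pvElimB]
  | cons i is ih =>
    intro rows ops
    rw [pv_elimB_cons, pv_elimB_cons]
    by_cases hb : pvBitB rows i c
    · rw [if_pos (by exact hb), if_pos (by exact hb)]
      rw [ih (rows.set i (rows.getD i 0 ^^^ rows.getD r 0)) (ops ++ [pvOp 0 r i n]),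
          ih (rows.set i (rows.getD i 0 ^^^ rows.getD r 0)) ([] ++ [pvOp 0 r i n])]
      simp
    · rw [if_neg (by exact hb), if_neg (by exact hb)]
      exact ih rows ops

theorem pv_elim_char (n : Int) (c r : Nat) :
    ∀ (m a : Nat) (rows : List Nat) (ops : List (List Int)), a + m ≤ r → r < rows.length →
      (pvElimB n c r (rows, ops) (List.range' a m)).2
          = ops ++ ((List.range' a m).filter (fun i => pvBit (rows.getD i 0) c)).map
              (fun i => pvOp 0 r i n)
        ∧ (pvElimB n c r (rows, ops) (List.range' a m)).1.length = rows.length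
        ∧ ∀ j, (pvElimB n c r (rows, ops) (List.range' a m)).1.getD j 0
            = if a ≤ j ∧ j < a + m ∧ pvBit (rows.getD j 0) c
              then rows.getD j 0 ^^^ rows.getD r 0 else rows.getD j 0 := by
  intro m
  induction m with
  | zero =>
    intro a rows ops _ _
    refine ⟨by simp [pvElimB], rfl, ?_⟩
    intro j
    rw [if_neg (by omega)]
    rfl
  | succ m ih =>
    intro a rows ops har hr
    rw [List.range'_succ, pv_elimB_cons]
    have hbB : pvBitB rows a c = pvBit (rows.getD a 0) c := rfl
    by_cases hb : pvBit (rows.getD a 0) c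
    · rw [if_pos (by rw [hbB]; exact hb)]
      simp only []
      set rows' := rows.set a (rows.getD a 0 ^^^ rows.getD r 0) with hrows'
      have hgd' : ∀ j, rows'.getD j 0
          = if a = j ∧ a < rows.length then rows.getD a 0 ^^^ rows.getD r 0
            else rows.getD j 0 := fun j => pv_getD_set rows a j _ 0
      have hlen' : rows'.length = rows.length := by simp [hrows']
      obtain ⟨h1, h2, h3⟩ := ih (a + 1) rows' (ops ++ [pvOp 0 r a n]) (by omega) (by omega)
      refine ⟨?_, by rw [h2, hlen'], ?_⟩
      · rw [h1]
        rw [List.filter_cons_of_pos (by exact hb)]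
        rw [List.filter_congr (l := List.range' (a + 1) m)
          (q := fun i => pvBit (rows.getD i 0) c) (fun i hi => by
            have : a + 1 ≤ i := (List.mem_range'_1.mp hi).1
            rw [hgd' i, if_neg (by omega)])]
        simp
      · intro j
        rw [h3 j]
        have hra : rows'.getD r 0 = rows.getD r 0 := by
          rw [hgd', if_neg (by omega)]
        by_cases hja : j = a
        · subst hja
          rw [if_neg (by omega), hgd', if_pos ⟨rfl, by omega⟩,
            if_pos ⟨by omega, by omega, hb⟩]
        · have hgdj : rows'.getD j 0 = rows.getD j 0 := by
            rw [hgd' j, if_neg (fun hcon => hja hcon.1.symm)]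
          rw [hgdj, hra]
          by_cases hcond : a + 1 ≤ j ∧ j < a + 1 + m ∧ pvBit (rows.getD j 0) c
          · rw [if_pos hcond, if_pos ⟨by omega, by omega, hcond.2.2⟩]
          · rw [if_neg hcond, if_neg (by
              intro hcon
              exact hcond ⟨by omega, by omega, hcon.2.2⟩)]
    · rw [if_neg (by rw [hbB]; exact hb)]
      obtain ⟨h1, h2, h3⟩ := ih (a + 1) rows ops (by omega) hr
      refine ⟨?_, h2, ?_⟩
      · rw [h1, List.filter_cons_of_neg (by simpa using hb)]
      · intro j
        rw [h3 j]
        by_cases hja : j = a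
        · subst hja
          rw [if_neg (by omega), if_neg (by
            intro hcon
            exact hb hcon.2.2)]
        · by_cases hcond : a + 1 ≤ j ∧ j < a + 1 + m ∧ pvBit (rows.getD j 0) c
          · rw [if_pos hcond, if_pos ⟨by omega, by omega, hcond.2.2⟩]
          · rw [if_neg hcond, if_neg (by
              intro hcon
              exact hcond ⟨by omega, by omega, hcon.2.2⟩)]

theorem pv_list_eq_of_getD (l1 l2 : List Nat) (hlen : l1.length = l2.length)
    (h : ∀ j, l1.getD j 0 = l2.getD j 0) : l1 = l2 := by
  apply List.ext_getElem hlen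
  intro j h1 h2
  have := h j
  rwa [pv_getD_eq_getElem _ _ h1, pv_getD_eq_getElem _ _ h2] at this

theorem pv_elim_fst (n : Int) (c r : Nat) (rows : List Nat) (ops : List (List Int))
    (hr : r < rows.length) :
    (pvElimB n c r (rows, ops) (List.range r)).1 = pvApplyP rows r c := by
  rw [List.range_eq_range']
  obtain ⟨_, h2, h3⟩ := pv_elim_char n c r r 0 rows ops (by omega) hr
  apply pv_list_eq_of_getD
  · rw [h2, pv_applyP_len]
  · intro j
    rw [h3 j, pv_applyP_getD]
    by_cases hc : j < r ∧ pvBit (rows.getD j 0) c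
    · rw [if_pos ⟨by omega, by omega, hc.2⟩, if_pos hc]
    · rw [if_neg (fun hcon => hc ⟨by omega, hcon.2.2⟩), if_neg hc]

theorem pv_elim_snd (n : Int) (c r : Nat) (rows : List Nat) (ops : List (List Int))
    (hr : r < rows.length) :
    (pvElimB n c r (rows, ops) (List.range r)).2
      = ops ++ ((List.range r).filter (fun i => pvBit (rows.getD i 0) c)).map
          (fun i => pvOp 0 r i n) := by
  rw [List.range_eq_range']
  exact (pv_elim_char n c r r 0 rows ops (by omega) hr).1

theorem pv_pm_acc (n : Int) :
    ∀ (ps : List (Nat × Nat)) (rows : List Nat) (ops : List (List Int)),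
      ps.foldl (fun st rc => pvElimB n rc.2 rc.1 st (List.range rc.1)) (rows, ops)
        = ((ps.foldl (fun st rc => pvElimB n rc.2 rc.1 st (List.range rc.1)) (rows, [])).1,
           ops ++ (ps.foldl (fun st rc => pvElimB n rc.2 rc.1 st (List.range rc.1)) (rows, [])).2) := by
  intro ps
  induction ps with
  | nil => intro rows ops; simp
  | cons rc ps ih =>
    intro rows ops
    rw [List.foldl_cons, List.foldl_cons]
    rw [pv_elim_acc n rc.2 rc.1 (List.range rc.1) rows ops]
    rw [show pvElimB n rc.2 rc.1 (rows, []) (List.range rc.1)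
        = ((pvElimB n rc.2 rc.1 (rows, []) (List.range rc.1)).1,
           (pvElimB n rc.2 rc.1 (rows, []) (List.range rc.1)).2) from rfl]
    rw [ih _ (ops ++ (pvElimB n rc.2 rc.1 (rows, []) (List.range rc.1)).2),
        ih _ ((pvElimB n rc.2 rc.1 (rows, []) (List.range rc.1)).2)]
    simp

theorem pv_firedSpec_mem :
    ∀ (ps : List (Nat × Nat)) (rows : List Nat) (i x : Nat),
      x ∈ pvFiredSpec rows i ps → x ∈ ps.map Prod.fst := by
  intro ps
  induction ps with
  | nil => intro rows i x h; simp [pvFiredSpec] at h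
  | cons rc ps ih =>
    intro rows i x h
    obtain ⟨r0, c0⟩ := rc
    rw [pv_firedSpec_cons] at h
    by_cases hle : r0 ≤ i
    · rw [if_pos hle] at h; simp at h
    · rw [if_neg hle] at h
      rcases List.mem_append.mp h with h1 | h1
      · by_cases hb : pvBit (rows.getD i 0) c0
        · rw [if_pos hb] at h1
          simp at h1
          simp [h1]
        · rw [if_neg hb] at h1; simp at h1
      · have := ih _ _ _ h1
        simp at this ⊢
        exact Or.inr this

theorem pv_bwdRow_spec (i : Nat) (red : List Nat) :
    ∀ (ps : List (Nat × Nat)) (rows : List Nat) (v : Nat) (f : List Nat),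
      ps.Pairwise (fun a b => b.1 < a.1) →
      (∀ p ∈ ps, i < p.1 → red.getD p.1 0 = (pvApplyAll rows ps).getD p.1 0) →
      v = rows.getD i 0 →
      pvBwdRow i red ps v f = ((pvApplyAll rows ps).getD i 0, f ++ pvFiredSpec rows i ps) := by
  intro ps
  induction ps with
  | nil =>
    intro rows v f _ _ hv
    simp [pvBwdRow, pvFiredSpec, pvApplyAll, hv]
  | cons rc ps ih =>
    intro rows v f hdesc hred hv
    obtain ⟨r, c⟩ := rc
    have htail : ∀ p ∈ ps, p.1 < r := by
      intro p hp
      exact (List.pairwise_cons.mp hdesc).1 p hp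
    have happ : pvApplyAll rows ((r, c) :: ps) = pvApplyAll (pvApplyP rows r c) ps := rfl
    by_cases hle : r ≤ i
    · rw [pv_bwdRow_cons, if_pos hle, pv_firedSpec_cons, if_pos hle]
      rw [happ, pv_applyAll_getD_le ps _ i (fun p hp => by have := htail p hp; omega),
        pv_applyP_getD_ge _ _ _ _ hle]
      simp [hv]
    · have hred_r : red.getD r 0 = rows.getD r 0 := by
        have h1 := hred (r, c) (by simp) (by omega)
        rw [happ, pv_applyAll_getD_le ps _ r (fun p hp => by have := htail p hp; omega),
          pv_applyP_getD_ge _ _ _ _ (Nat.le_refl r)] at h1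
        exact h1
      have hfs : pvFiredSpec rows i ((r, c) :: ps)
          = (if pvBit (rows.getD i 0) c then [r] else [])
            ++ pvFiredSpec (pvApplyP rows r c) i ps := by
        rw [pv_firedSpec_cons, if_neg hle]
      have hred' : ∀ p ∈ ps, i < p.1 →
          red.getD p.1 0 = (pvApplyAll (pvApplyP rows r c) ps).getD p.1 0 := by
        intro p hp hip
        rw [← happ]
        exact hred p (by simp [hp]) hip
      by_cases hb : pvBit (rows.getD i 0) c
      · rw [pv_bwdRow_cons, if_neg hle, if_pos (by rw [hv]; exact hb)]
        rw [ih (pvApplyP rows r c) (v ^^^ red.getD r 0) (f ++ [r])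
          (List.pairwise_cons.mp hdesc).2 hred'
          (by rw [hv, hred_r, pv_applyP_getD, if_pos ⟨by omega, hb⟩])]
        rw [happ, hfs, if_pos hb]
        simp
      · rw [pv_bwdRow_cons, if_neg hle, if_neg (by rw [hv]; simpa using hb)]
        rw [ih (pvApplyP rows r c) v f (List.pairwise_cons.mp hdesc).2 hred'
          (by rw [hv, pv_applyP_getD, if_neg (fun hcon => hb hcon.2)])]
        rw [happ, hfs, if_neg hb]
        simp

theorem pv_getD_set_list (l : List (List Nat)) (i j : Nat) (a : List Nat) :
    (l.set i a).getD j [] = if i = j ∧ i < l.length then a else l.getD j [] := by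
  rw [List.getD_eq_getElem?_getD, List.getD_eq_getElem?_getD, List.getElem?_set]
  by_cases h1 : i = j
  · subst h1
    by_cases h2 : i < l.length
    · simp [h2]
    · have : l[i]? = none := List.getElem?_eq_none (by omega)
      simp [h2, this]
  · simp [h1]

theorem pv_bwdOuter_spec (ps : List (Nat × Nat)) (rows : List Nat) (N : Nat)
    (hdesc : ps.Pairwise (fun a b => b.1 < a.1))
    (hbnd : ∀ p ∈ ps, p.1 < N) :
    ∀ (k : Nat) (st : List Nat × List (List Nat)),
      k ≤ N → st.1.length = N → st.2.length = N →
      (∀ j, k ≤ j → j < N → st.1.getD j 0 = (pvApplyAll rows ps).getD j 0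
            ∧ st.2.getD j [] = pvFiredSpec rows j ps) →
      ∀ j, j < N → (pvBwdOuter ps rows k st).2.getD j [] = pvFiredSpec rows j ps := by
  intro k
  induction k with
  | zero =>
    intro st _ _ _ hinv j hj
    exact (hinv j (Nat.zero_le j) hj).2
  | succ k ih =>
    intro st hk h1 h2 hinv j hj
    rw [show pvBwdOuter ps rows (k + 1) st
        = pvBwdOuter ps rows k
            (st.1.set k (pvBwdRow k st.1 ps (rows.getD k 0) []).1,
             st.2.set k (pvBwdRow k st.1 ps (rows.getD k 0) []).2) from rfl]
    have hrow := pv_bwdRow_spec k st.1 ps rows (rows.getD k 0) [] hdesc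
      (fun p hp hkp => (hinv p.1 (by omega) (hbnd p hp)).1) rfl
    refine ih _ (by omega) (by simp [h1]) (by simp [h2]) ?_ j hj
    intro j' hkj' hj'
    constructor
    · rw [pv_getD_set]
      by_cases hjk : k = j'
      · subst hjk
        rw [if_pos ⟨rfl, by omega⟩, hrow]
      · rw [if_neg (by tauto)]
        exact (hinv j' (by omega) hj').1
    · rw [pv_getD_set_list]
      by_cases hjk : k = j'
      · subst hjk
        rw [if_pos ⟨rfl, by omega⟩, hrow]
        simp
      · rw [if_neg (by tauto)]
        exact (hinv j' (by omega) hj').2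

theorem pv_flatMap_congr {α β : Type} (l : List α) (f g : α → List β)
    (h : ∀ x ∈ l, f x = g x) : l.flatMap f = l.flatMap g := by
  induction l with
  | nil => rfl
  | cons a l ih =>
    rw [List.flatMap_cons, List.flatMap_cons, h a (by simp),
      ih (fun x hx => h x (by simp [hx]))]

theorem pv_pm_flatmap (n : Int) :
    ∀ (ps : List (Nat × Nat)) (rows : List Nat),
      ps.Pairwise (fun a b => b.1 < a.1) → (∀ p ∈ ps, p.1 < rows.length) →
      (ps.foldl (fun st rc => pvElimB n rc.2 rc.1 st (List.range rc.1)) (rows, [])).2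
        = ps.flatMap (fun rc => ((List.range rc.1).filter
            (fun i => (pvFiredSpec rows i ps).contains rc.1)).map (fun i => pvOp 0 rc.1 i n)) := by
  intro ps
  induction ps with
  | nil => intro rows _ _; rfl
  | cons rc ps ih =>
    intro rows hdesc hbnd
    obtain ⟨r, c⟩ := rc
    have hr : r < rows.length := hbnd (r, c) (by simp)
    have htail : ∀ p ∈ ps, p.1 < r := fun p hp => (List.pairwise_cons.mp hdesc).1 p hp
    rw [List.foldl_cons]
    rw [show pvElimB n (r, c).2 (r, c).1 (rows, []) (List.range (r, c).1)
        = (pvApplyP rows r c,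
           [] ++ ((List.range r).filter (fun i => pvBit (rows.getD i 0) c)).map
             (fun i => pvOp 0 r i n)) from by
      rw [← pv_elim_fst n c r rows [] hr, ← pv_elim_snd n c r rows [] hr]]
    rw [pv_pm_acc n ps (pvApplyP rows r c)
      ([] ++ ((List.range r).filter (fun i => pvBit (rows.getD i 0) c)).map
        (fun i => pvOp 0 r i n))]
    rw [show (((ps.foldl (fun st rc => pvElimB n rc.2 rc.1 st (List.range rc.1)) (pvApplyP rows r c, [])).1,
        ([] ++ ((List.range r).filter (fun i => pvBit (rows.getD i 0) c)).map (fun i => pvOp 0 r i n))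
          ++ (ps.foldl (fun st rc => pvElimB n rc.2 rc.1 st (List.range rc.1)) (pvApplyP rows r c, [])).2) :
          List Nat × List (List Int)).2
        = ([] ++ ((List.range r).filter (fun i => pvBit (rows.getD i 0) c)).map (fun i => pvOp 0 r i n))
          ++ (ps.foldl (fun st rc => pvElimB n rc.2 rc.1 st (List.range rc.1)) (pvApplyP rows r c, [])).2
      from rfl]
    rw [ih (pvApplyP rows r c) (List.pairwise_cons.mp hdesc).2
      (fun p hp => by rw [pv_applyP_len]; have := htail p hp; omega)]
    rw [List.flatMap_cons]
    simp only [List.nil_append]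
    congr 1
    · -- head group: the recorded bit test equals membership of r in the fired list
      congr 1
      refine (List.filter_congr ?_).symm
      intro i hi
      have hir : i < r := List.mem_range.mp hi
      rw [pv_firedSpec_cons, if_neg (by omega)]
      have hnot : (pvFiredSpec (pvApplyP rows r c) i ps).contains r = false := by
        rw [Bool.eq_false_iff]
        intro hcon
        have hmem := pv_firedSpec_mem ps (pvApplyP rows r c) i r (by simpa using hcon)
        rcases List.mem_map.mp hmem with ⟨q, hq, hq1⟩
        have := htail q hq
        omega
      cases hb : pvBit (rows.getD i 0) c with
      | false =>
        rw [if_neg (by simp), List.nil_append, hnot]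
      | true =>
        rw [if_pos rfl, List.singleton_append, List.contains_cons]
        simp
    · -- tail groups: pivot rows are below r, so the head entry never matters
      apply pv_flatMap_congr
      intro rc' hrc'
      congr 1
      apply List.filter_congr
      intro i hi
      have hir : i < rc'.1 := List.mem_range.mp hi
      have hrcr : rc'.1 < r := htail rc' hrc'
      rw [pv_firedSpec_cons, if_neg (by omega)]
      cases hb : pvBit (rows.getD i 0) c with
      | false => rw [if_neg (by simp), List.nil_append]
      | true =>
        rw [if_pos rfl, List.singleton_append, List.contains_cons]
        have hne : (rc'.1 == r) = false := by
          simp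
          omega
        rw [hne]
        simp


theorem pv_bwd_rowmajor_w (n : Int) (N : Nat) (rows : List Nat) (ps : List (Nat × Nat))
    (hlen : rows.length = N)
    (hdesc : ps.Pairwise (fun a b => b.1 < a.1))
    (hbnd : ∀ p ∈ ps, p.1 < N) :
    (ps.foldl (fun st rc => pvElimB n rc.2 rc.1 st (List.range rc.1)) (rows, [])).2
      = ps.flatMap (fun rc =>
          ((List.range rc.1).filter (fun i =>
              ((pvBwdOuter ps rows N (List.replicate N 0, List.replicate N [])).2.getD i []).contains rc.1)).map
            (fun i => pvOp 0 rc.1 i n)) := by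
  rw [pv_pm_flatmap n ps rows hdesc (by rw [hlen]; exact hbnd)]
  apply pv_flatMap_congr
  intro rc hrc
  congr 1
  apply List.filter_congr
  intro i hi
  have hi2 : i < N := by
    have := List.mem_range.mp hi
    have := hbnd rc hrc
    omega
  rw [pv_bwdOuter_spec ps rows N hdesc hbnd N
    (List.replicate N 0, List.replicate N []) (Nat.le_refl N) (by simp) (by simp)
    (fun j h1 h2 => by omega) i hi2]


-- ===== VERDICT (by name: the statement is the Claim_ definition above) =====
theorem make_ops_n2_spec : Claim_equal_make_ops_n2 := by
  intro mat n _ hpre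
  unfold Spec_make_ops_n2 make_ops_n2 make_ops_n2_alt
  simp only [List.length_map]
  set N := mat.length with hN
  have hpack : mat.map pvPackB = mat.map pvMaskB :=
    List.map_congr_left (fun row _ => pv_packB_eq row)
  rw [hpack]
  obtain ⟨hf, hp, hrel⟩ := pv_fwd_sim n N (List.range N)
    (mat.map (fun row => row)) (mat.map pvMaskB) [] [] 0
    (pv_rel_init mat hpre.2) (fun c hcm => List.mem_range.mp hcm) (Nat.zero_le _)
  have h3 : pvFwdB n N 0 [] (mat.map pvMaskB) [] []
      = pvFwdN n N (List.range N) (mat.map pvMaskB) [] [] 0 := by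
    have := pv_fwdB_eq_fwdN_w n N 0 [] (mat.map pvMaskB) [] [] (by simp [hN])
    simpa [List.range_eq_range'] using this
  rw [h3]
  have hbnd := pv_fwd_piv_bound n N (List.range N)
    (mat.map (fun row => row)) [] [] 0
    (fun c hcm => List.mem_range.mp hcm) (Nat.zero_le _) (by simp)
  set stN := pvFwdN n N (List.range N) (mat.map pvMaskB) [] [] 0 with hstN
  have hbwdA := pv_bwd_sim n N
    ((pvFwdA n N (List.range N) (mat.map (fun row => row)) [] [] 0).2.2.reverse)
    (pvFwdA n N (List.range N) (mat.map (fun row => row)) [] [] 0).1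
    stN.1 [] hrel
    (fun x hx => hbnd x (List.mem_reverse.mp hx))
  have hlenN : stN.1.length = N := by
    rw [hstN, pv_fwdN_len]; simp [hN]
  have hdesc : (stN.2.2.reverse).Pairwise (fun a b => b.1 < a.1) := by
    rw [List.pairwise_reverse]
    exact pv_fwdN_piv_incr n N (List.range N) (mat.map pvMaskB) [] [] 0 (by simp) (by simp)
  have hbnd' : ∀ p ∈ stN.2.2.reverse, p.1 < N := by
    intro p hp2
    exact (hbnd p (by rw [hp]; exact List.mem_reverse.mp hp2)).1
  refine Prod.ext hf ?_
  rw [hp] at hbwdA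
  rw [hp, hbwdA]
  exact pv_bwd_rowmajor_w n N stN.1 stN.2.2.reverse hlenN hdesc hbnd'
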